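-- pv_equiv track=rewrite | github.com/siddhantripathi/email_parser | parser.py | _validate_email_chunk
-- ===== SOURCE A (Python) =====
-- def _validate_email_chunk(email_lines: list[str]) -> bool:
--     """Validate basic email structure"""
--     required_headers = {'from', 'to', 'subject'}
--     found_headers = set()
--
--     for line in email_lines[:10]:  # Check first 10 lines for headers
--         if line.lower().startswith('from:'):
--             found_headers.add('from')
--         elif line.lower().startswith('to:'):
--             found_headers.add('to')
--         elif line.lower().startswith('subject:'):
--             found_headers.add('subject')
--
--     return required_headers.issubset(found_headers)
-- ===== SOURCE B (Python) =====
-- def _validate_email_chunk(email_lines: list[str]) -> bool: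
--     """Validate basic email structure"""
--     head = email_lines[:10]
--     return all(
--         any(line.lower().startswith(h + ':') for line in head)
--         for h in ('from', 'to', 'subject')
--     )
-- ===== Notes on version B (the rewrite author's own statement) =====
-- stated objective: idiomatic
-- what changed: Replaces the single accumulating pass that builds a found-headers set with an inverted all/any nesting: for each required header, scan the first 10 lines for a line starting with it.
import Mathlib
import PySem

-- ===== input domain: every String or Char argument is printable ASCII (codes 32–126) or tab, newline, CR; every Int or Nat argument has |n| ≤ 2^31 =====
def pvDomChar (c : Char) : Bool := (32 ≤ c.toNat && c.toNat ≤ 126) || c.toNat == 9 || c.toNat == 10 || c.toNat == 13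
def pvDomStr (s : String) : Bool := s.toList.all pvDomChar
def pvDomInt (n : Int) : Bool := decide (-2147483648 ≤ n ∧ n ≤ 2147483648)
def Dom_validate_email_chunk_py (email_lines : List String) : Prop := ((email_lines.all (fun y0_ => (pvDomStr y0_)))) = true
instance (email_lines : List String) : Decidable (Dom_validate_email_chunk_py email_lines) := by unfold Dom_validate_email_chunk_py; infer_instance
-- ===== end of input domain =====

-- B replaces A's single accumulating pass (building a found-headers set) with an
-- inverted all/any nesting: for each required header, scan the first 10 lines. Idiomatic, same cost.

-- ===== PORT A =====
def validate_email_chunk_py (email_lines : List String) : Bool :=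
  let found : PySem.Set String :=
    (PySem.List.slice email_lines none (some 10)).foldl (fun fh line =>
      if PySem.Str.startswith (PySem.Str.lower line) "from:" then PySem.Set.add fh "from"
      else if PySem.Str.startswith (PySem.Str.lower line) "to:" then PySem.Set.add fh "to"
      else if PySem.Str.startswith (PySem.Str.lower line) "subject:" then PySem.Set.add fh "subject"
      else fh) PySem.Set.empty
  PySem.Set.issubset (PySem.Set.ofList ["from", "to", "subject"]) found

-- ===== PORT B =====
def validate_email_chunk_py_alt (email_lines : List String) : Bool :=
  let head := PySem.List.slice email_lines none (some 10)
  ["from", "to", "subject"].all (fun h =>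
    head.any (fun line => PySem.Str.startswith (PySem.Str.lower line) (h ++ ":")))

-- ===== PRECONDITION & SPEC =====
def Spec_validate_email_chunk_py (email_lines : List String) (out : Bool) : Prop := out = validate_email_chunk_py_alt email_lines
instance (email_lines : List String) (out : Bool) : Decidable (Spec_validate_email_chunk_py email_lines out) := by unfold Spec_validate_email_chunk_py; infer_instance

-- ===== CLAIM (what is proved, stated in full; the proofs are below) =====
def Claim_equal_validate_email_chunk_py : Prop := ∀ (email_lines : List String), Dom_validate_email_chunk_py email_lines → Spec_validate_email_chunk_py email_lines (validate_email_chunk_py email_lines)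

-- ===== LEMMAS AND PROOFS =====

-- the loop body of A's fold
def pvStep (fh : PySem.Set String) (line : String) : PySem.Set String :=
  if PySem.Str.startswith (PySem.Str.lower line) "from:" then PySem.Set.add fh "from"
  else if PySem.Str.startswith (PySem.Str.lower line) "to:" then PySem.Set.add fh "to"
  else if PySem.Str.startswith (PySem.Str.lower line) "subject:" then PySem.Set.add fh "subject"
  else fh

-- two header prefixes with different first characters cannot both be prefixes of the same line
lemma pv_excl {xs p q : List Char} {c d : Char} (hcd : (c == d) = false)
    (h1 : PySem.Chars.startswith xs (c :: p) = true) :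
    PySem.Chars.startswith xs (d :: q) = false := by
  rw [PySem.Chars.startswith_iff] at h1
  cases h2 : PySem.Chars.startswith xs (d :: q) with
  | false => rfl
  | true =>
    rw [PySem.Chars.startswith_iff] at h2
    obtain ⟨t1, e1⟩ := h1
    obtain ⟨t2, e2⟩ := h2
    rw [← e1] at e2
    injection e2 with h _
    simp_all

-- membership in the fold's result, for each required header h: since the three header
-- prefixes are mutually exclusive as prefixes, the elif chain adds h iff some line starts with h++":".
lemma mem_foldl_step (h : String)
    (hh : h = "from" ∨ h = "to" ∨ h = "subject") :
    ∀ (l : List String) (s : PySem.Set String),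
      (h ∈ l.foldl pvStep s) ↔
        (h ∈ s ∨ ∃ line ∈ l, PySem.Str.startswith (PySem.Str.lower line) (h ++ ":") = true) := by
  intro l
  induction l with
  | nil => simp
  | cons a t ih =>
    intro s
    simp only [List.foldl_cons, ih, List.mem_cons]
    unfold pvStep
    -- key fact: a lowered line cannot start with two distinct header prefixes
    rcases hh with rfl | rfl | rfl <;>
      split_ifs with h1 h2 h3 <;>
      simp_all [PySem.Set.mem_add,
        pv_excl (xs := PySem.Chars.lower a.toList) (c := 'f') (p := ['r','o','m',':']) (d := 't') (q := ['o',':']) (by decide),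
        pv_excl (xs := PySem.Chars.lower a.toList) (c := 'f') (p := ['r','o','m',':']) (d := 's') (q := ['u','b','j','e','c','t',':']) (by decide),
        pv_excl (xs := PySem.Chars.lower a.toList) (c := 't') (p := ['o',':']) (d := 'f') (q := ['r','o','m',':']) (by decide),
        pv_excl (xs := PySem.Chars.lower a.toList) (c := 't') (p := ['o',':']) (d := 's') (q := ['u','b','j','e','c','t',':']) (by decide),
        pv_excl (xs := PySem.Chars.lower a.toList) (c := 's') (p := ['u','b','j','e','c','t',':']) (d := 'f') (q := ['r','o','m',':']) (by decide),
        pv_excl (xs := PySem.Chars.lower a.toList) (c := 's') (p := ['u','b','j','e','c','t',':']) (d := 't') (q := ['o',':']) (by decide)]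
  

theorem validate_email_chunk_py_spec : Claim_equal_validate_email_chunk_py := by
  intro email_lines _
  unfold Spec_validate_email_chunk_py validate_email_chunk_py validate_email_chunk_py_alt
  rw [Bool.eq_iff_iff]
  have hf := mem_foldl_step "from" (Or.inl rfl) (PySem.List.slice email_lines none (some 10)) PySem.Set.empty
  have ht := mem_foldl_step "to" (Or.inr (Or.inl rfl)) (PySem.List.slice email_lines none (some 10)) PySem.Set.empty
  have hs := mem_foldl_step "subject" (Or.inr (Or.inr rfl)) (PySem.List.slice email_lines none (some 10)) PySem.Set.empty
  show (PySem.Set.issubset _ ((PySem.List.slice email_lines none (some 10)).foldl pvStep PySem.Set.empty) = true) ↔ _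
  rw [PySem.Set.issubset_iff]
  have hof : PySem.Set.ofList ["from", "to", "subject"] = ["from", "to", "subject"] := by decide
  rw [hof]
  simp only [PySem.Set.empty, List.all_eq_true, List.any_eq_true, List.mem_cons,
    List.not_mem_nil]
  constructor
  · intro h x hx
    have h1 := h "from" (by simp)
    have h2 := h "to" (by simp)
    have h3 := h "subject" (by simp)
    rcases hx with rfl | rfl | rfl | ⟨⟩ <;> simp_all
  · intro h x hx
    have h1 := h "from" (by simp)
    have h2 := h "to" (by simp)
    have h3 := h "subject" (by simp)
    rcases hx with rfl | rfl | rfl | ⟨⟩ <;> simp_all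

-- ===== VERDICT (by name: the statement is the Claim_ definition above) =====
-- (validate_email_chunk_py_spec above proves Claim_equal_validate_email_chunk_py directly)
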